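-- pv_equiv track=rewrite | github.com/opensensor/bionpu | src/bionpu/kernels/crispr/pam_filter_iupac/__init__.py | _plan_chunks
-- ===== SOURCE A (Python) =====
-- SEQ_IN_CHUNK_BYTES_BASE: int = 4096
--
-- PFI_OVERLAP_BYTES: int = 8
--
-- PFI_HEADER_BYTES: int = 24
--
-- def _plan_chunks(n_input_bytes: int) -> list[tuple[int, int]]:
--     """Mirror of runner.cpp::plan_chunks.
--
--     Returns ``[(src_offset, payload_bytes), ...]``.
--     """
--     if n_input_bytes == 0:
--         return []
--     total_chunk = SEQ_IN_CHUNK_BYTES_BASE + PFI_OVERLAP_BYTES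
--     payload_cap = total_chunk - PFI_HEADER_BYTES
--     advance = payload_cap - PFI_OVERLAP_BYTES
--     plan: list[tuple[int, int]] = []
--     off = 0
--     while off < n_input_bytes:
--         end = min(off + payload_cap, n_input_bytes)
--         plan.append((off, end - off))
--         if end >= n_input_bytes:
--             break
--         off += advance
--     return plan
-- ===== SOURCE B (Python) =====
-- SEQ_IN_CHUNK_BYTES_BASE: int = 4096
-- PFI_OVERLAP_BYTES: int = 8
-- PFI_HEADER_BYTES: int = 24
--
-- def _plan_chunks(n_input_bytes: int) -> list[tuple[int, int]]:
--     """Build the plan back-to-front: locate the final (short) chunk first by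
--     ceiling division, then walk backwards prepending full-capacity chunks,
--     so the loop never computes a min() and never tests end-of-input."""
--     if n_input_bytes <= 0:
--         return []
--     payload_cap = SEQ_IN_CHUNK_BYTES_BASE + PFI_OVERLAP_BYTES - PFI_HEADER_BYTES
--     advance = payload_cap - PFI_OVERLAP_BYTES
--     if n_input_bytes <= payload_cap:
--         off = 0
--     else:
--         off = advance * ((n_input_bytes - payload_cap + advance - 1) // advance)
--     plan = [(off, n_input_bytes - off)]
--     while off > 0:
--         off -= advance
--         plan.append((off, payload_cap))
--     plan.reverse()
--     return plan
-- ===== Notes on version B (the rewrite author's own statement) =====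
-- stated objective: alternative
-- what changed: Builds the plan back-to-front: the final short chunk's offset is located first by ceiling division, then the loop walks backwards emitting only full-capacity chunks and reverses at the end, so no min() or end-of-input test is ever evaluated in the loop, unlike A's forward break-on-end accumulation.
import Mathlib
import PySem

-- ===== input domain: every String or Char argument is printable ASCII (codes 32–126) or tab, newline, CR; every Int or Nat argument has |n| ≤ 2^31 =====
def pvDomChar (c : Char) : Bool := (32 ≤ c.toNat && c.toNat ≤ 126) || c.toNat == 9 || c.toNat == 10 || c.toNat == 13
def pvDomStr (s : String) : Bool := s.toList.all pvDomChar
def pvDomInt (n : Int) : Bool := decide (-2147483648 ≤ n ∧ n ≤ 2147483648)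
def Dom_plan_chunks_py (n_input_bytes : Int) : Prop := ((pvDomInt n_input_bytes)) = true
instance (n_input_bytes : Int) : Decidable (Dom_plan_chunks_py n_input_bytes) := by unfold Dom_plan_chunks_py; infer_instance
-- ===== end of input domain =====

-- B builds the plan back-to-front: it locates the final short chunk by ceiling division,
-- then walks backwards emitting only full-capacity chunks and reverses at the end;
-- alternative decomposition, same cost as A's forward break-on-end loop.

def SEQ_IN_CHUNK_BYTES_BASE : Int := 4096
def PFI_OVERLAP_BYTES : Int := 8
def PFI_HEADER_BYTES : Int := 24

-- ===== PORT A =====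
-- the while loop of _plan_chunks, state = (off, plan); constants as in the module;
-- the Nat argument is a fuel bound for totality only (enough since off grows by 4072 ≥ 1 each pass)
def planChunksLoopA : Nat → Int → Int → List (Int × Int) → List (Int × Int)
  | 0, _, _, plan => plan
  | fuel + 1, n, off, plan =>
    let total_chunk := SEQ_IN_CHUNK_BYTES_BASE + PFI_OVERLAP_BYTES
    let payload_cap := total_chunk - PFI_HEADER_BYTES
    let advance := payload_cap - PFI_OVERLAP_BYTES
    if off < n then
      let e := min (off + payload_cap) n
      let plan' := plan ++ [(off, e - off)]
      if e ≥ n then plan' else planChunksLoopA fuel n (off + advance) plan'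
    else plan

def plan_chunks_py (n_input_bytes : Int) : List (Int × Int) :=
  if n_input_bytes = 0 then [] else planChunksLoopA (n_input_bytes.toNat + 1) n_input_bytes 0 []

-- ===== PORT B =====
-- the backwards while loop of B: while off > 0: off -= advance; plan.append((off, payload_cap));
-- the Nat argument is a fuel bound for totality only
def planChunksLoopB : Nat → Int → List (Int × Int) → List (Int × Int)
  | 0, _, plan => plan
  | fuel + 1, off, plan =>
    if 0 < off then planChunksLoopB fuel (off - 4072) (plan ++ [(off - 4072, 4080)])
    else plan

def plan_chunks_py_alt (n_input_bytes : Int) : List (Int × Int) :=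
  if n_input_bytes ≤ 0 then []
  else
    let payload_cap := SEQ_IN_CHUNK_BYTES_BASE + PFI_OVERLAP_BYTES - PFI_HEADER_BYTES
    let advance := payload_cap - PFI_OVERLAP_BYTES
    let off : Int := if n_input_bytes ≤ payload_cap then 0
      else advance * (PySem.Int.floordiv (n_input_bytes - payload_cap + advance - 1) advance)
    (planChunksLoopB (n_input_bytes.toNat + 1) off [(off, n_input_bytes - off)]).reverse

-- ===== PRECONDITION & SPEC =====
def Spec_plan_chunks_py (n_input_bytes : Int) (out : List (Int × Int)) : Prop := out = plan_chunks_py_alt n_input_bytes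
instance (n_input_bytes : Int) (out : List (Int × Int)) : Decidable (Spec_plan_chunks_py n_input_bytes out) := by unfold Spec_plan_chunks_py; infer_instance

-- ===== CLAIM (what is proved, stated in full; the proofs are below) =====
def Claim_equal_plan_chunks_py : Prop := ∀ (n_input_bytes : Int), Dom_plan_chunks_py n_input_bytes → Spec_plan_chunks_py n_input_bytes (plan_chunks_py n_input_bytes)

-- ===== LEMMAS AND PROOFS =====

-- proof-side chunk count for a remaining byte count r > 0
def chunkCount (r : Int) : Int := if r ≤ 4080 then 1 else 1 + (r - 4080 + 4072 - 1) / 4072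

lemma chunkCount_pos (r : Int) (_ : 0 < r) : 0 < chunkCount r := by
  unfold chunkCount; split_ifs <;> omega

lemma chunkCount_step (r : Int) (h : 4080 < r) :
    chunkCount r = 1 + chunkCount (r - 4072) := by
  unfold chunkCount; split_ifs <;> omega

-- A's loop never moves when the guard fails, whatever the fuel
lemma loopA_stop (fuel : Nat) (n off : Int) (plan : List (Int × Int)) (h : ¬ off < n) :
    planChunksLoopA fuel n off plan = plan := by
  cases fuel with
  | zero => rfl
  | succ fuel => rw [planChunksLoopA]; simp only [if_neg h]

-- A's loop, from any offset and with enough fuel, produces exactly the closed-form list of chunks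
lemma loopA_closed (k : Nat) : ∀ (n off : Int) (acc : List (Int × Int)),
    off < n → (n - off).toNat ≤ k →
    planChunksLoopA k n off acc =
      acc ++ (List.range (chunkCount (n - off)).toNat).map
        (fun i : Nat => (off + (i : Int) * 4072, min 4080 (n - off - (i : Int) * 4072))) := by
  induction k with
  | zero => intro n off acc _ hk; omega
  | succ k ih =>
    intro n off acc h hk
    rw [planChunksLoopA]
    simp only [SEQ_IN_CHUNK_BYTES_BASE, PFI_OVERLAP_BYTES, PFI_HEADER_BYTES]
    rw [if_pos h]
    by_cases hs : n - off ≤ 4080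
    · have he : min (off + (4096 + 8 - 24)) n = n := by omega
      rw [he, if_pos (le_refl n)]
      have hc : (chunkCount (n - off)).toNat = 1 := by unfold chunkCount; rw [if_pos hs]; rfl
      have hmin : min 4080 (n - off) = n - off := by omega
      simp [hc, hmin]
    · have he : min (off + (4096 + 8 - 24)) n = off + 4080 := by omega
      have hge : ¬ (off + 4080 ≥ n) := by omega
      rw [he, if_neg hge]
      rw [ih n (off + (4096 + 8 - 24 - 8)) (acc ++ [(off, off + 4080 - off)])
        (by omega) (by omega)]
      have hstep : (chunkCount (n - off)).toNat
          = (chunkCount (n - (off + 4072))).toNat + 1 := by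
        have h1 := chunkCount_step (n - off) (by omega)
        have h2 := chunkCount_pos (n - (off + 4072)) (by omega)
        have : n - off - 4072 = n - (off + 4072) := by ring
        rw [this] at h1
        omega
      have hrw : n - (off + (4096 + 8 - 24 - 8)) = n - (off + 4072) := by ring
      rw [hrw, hstep, List.range_succ_eq_map, List.map_cons, List.map_map]
      simp only [List.append_assoc, List.singleton_append, Nat.cast_zero, zero_mul,
        add_zero, sub_zero]
      have hmin : min 4080 (n - off) = 4080 := min_eq_left (by omega)
      have hh : ((off, off + 4080 - off) : Int × Int) = (off, min 4080 (n - off)) := by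
        rw [hmin]; simp only [Prod.mk.injEq, true_and]; omega
      have ht : List.map
            (fun i : Nat => (off + (4096 + 8 - 24 - 8) + (i : Int) * 4072,
              min 4080 (n - (off + 4072) - (i : Int) * 4072)))
            (List.range (chunkCount (n - (off + 4072))).toNat)
          = List.map
            ((fun i : Nat => (off + (i : Int) * 4072, min 4080 (n - off - (i : Int) * 4072))) ∘ Nat.succ)
            (List.range (chunkCount (n - (off + 4072))).toNat) := by
        apply List.map_congr_left
        intro i _
        simp only [Function.comp_apply, Nat.cast_succ, Prod.mk.injEq]
        constructor <;> ring_nf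
      rw [hh, ht]

-- B's backwards loop from offset j*4072, with enough fuel, appends the full chunks in descending order
lemma loopB_closed (fuel : Nat) : ∀ (j : Nat), j ≤ fuel → ∀ (acc : List (Int × Int)),
    planChunksLoopB fuel ((j : Int) * 4072) acc =
      acc ++ (List.range j).reverse.map (fun i : Nat => ((i : Int) * 4072, 4080)) := by
  induction fuel with
  | zero =>
    intro j hj acc
    have hj0 : j = 0 := by omega
    subst hj0
    simp [planChunksLoopB]
  | succ fuel ih =>
    intro j hj acc
    cases j with
    | zero => rw [planChunksLoopB]; simp
    | succ j =>
      rw [planChunksLoopB]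
      rw [if_pos (by positivity)]
      have h1 : ((j + 1 : Nat) : Int) * 4072 - 4072 = (j : Int) * 4072 := by push_cast; ring
      rw [h1, ih j (by omega)]
      rw [List.range_succ, List.reverse_append]
      simp

-- ===== VERDICT (by name: the statement is the Claim_ definition above) =====
theorem plan_chunks_py_spec : Claim_equal_plan_chunks_py := by
  intro n _
  unfold Spec_plan_chunks_py plan_chunks_py plan_chunks_py_alt
  by_cases hz : n ≤ 0
  · rw [if_pos hz]
    split_ifs with h0
    · rfl
    · rw [loopA_stop _ _ _ _ (by omega)]
  · rw [if_neg hz, if_neg (by omega : ¬ n = 0)]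
    simp only [SEQ_IN_CHUNK_BYTES_BASE, PFI_OVERLAP_BYTES, PFI_HEADER_BYTES]
    -- the number of chunks
    set m : Nat := (chunkCount n).toNat with hm
    have hm1 : 1 ≤ m := by
      have := chunkCount_pos n (by omega); omega
    -- A's side: closed form
    rw [loopA_closed (n.toNat + 1) n 0 [] (by omega) (by omega)]
    simp only [sub_zero, List.nil_append]
    rw [← hm]
    -- B's starting offset equals (m-1)*4072
    have hoff : (if n ≤ 4096 + 8 - 24 then (0 : Int)
        else (4096 + 8 - 24 - 8) * PySem.Int.floordiv (n - (4096 + 8 - 24) + (4096 + 8 - 24 - 8) - 1) (4096 + 8 - 24 - 8))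
        = ((m : Int) - 1) * 4072 := by
      split_ifs with hsmall
      · have : chunkCount n = 1 := by unfold chunkCount; rw [if_pos (by omega)]
        simp [hm, this]
      · rw [PySem.Int.floordiv_eq_ediv_of_pos (by norm_num)]
        have hc : chunkCount n = 1 + (n - 4080 + 4072 - 1) / 4072 := by
          unfold chunkCount; rw [if_neg (by omega)]
        have hpos : 0 < chunkCount n := chunkCount_pos n (by omega)
        have : ((m : Int)) = chunkCount n := by omega
        rw [this, hc]
        norm_num
        ring
    rw [hoff]
    have hmm : ((m : Int) - 1) = ((m - 1 : Nat) : Int) := by omega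
    rw [hmm]
    have hfuel : m - 1 ≤ n.toNat + 1 := by
      have hmc2 : ((m : Int)) = chunkCount n := by
        have := chunkCount_pos n (by omega); omega
      unfold chunkCount at hmc2
      split_ifs at hmc2 <;> omega
    rw [loopB_closed _ (m - 1) hfuel]
    rw [List.singleton_append, List.reverse_cons, List.map_reverse, List.reverse_reverse]
    -- split A's range at m-1
    have hsplit : m = (m - 1) + 1 := by omega
    rw [hsplit, List.range_succ, List.map_append]
    congr 1
    · -- the first m-1 chunks are full
      apply List.map_congr_left
      intro i hi
      simp only [List.mem_range] at hi
      simp only [zero_add, Prod.mk.injEq, true_and]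
      -- n - i*4072 ≥ 4080 for i < m-1
      have hbig : ¬ (n ≤ 4080) := by
        by_contra hle
        have : chunkCount n = 1 := by unfold chunkCount; rw [if_pos (by omega)]
        omega
      have hc : chunkCount n = 1 + (n - 4080 + 4072 - 1) / 4072 := by
        unfold chunkCount; rw [if_neg hbig]
      have hmc : ((m : Int)) = chunkCount n := by
        have := chunkCount_pos n (by omega); omega
      have hiI : ((i : Int)) + 1 < (m : Int) := by exact_mod_cast (by omega : i + 1 < m)
      rw [hmc, hc] at hiI
      have : (4080 : Int) ≤ n - (i : Int) * 4072 := by omega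
      omega
    · -- the last chunk
      simp only [List.map_cons, List.map_nil, zero_add, Prod.mk.injEq, List.cons.injEq, and_true]
      constructor
      · push_cast; omega
      · -- min 4080 (n - (m-1)*4072) = n - (m-1)*4072
        have hmc : ((m : Int)) = chunkCount n := by
          have := chunkCount_pos n (by omega); omega
        have : n - ((m - 1 : Nat) : Int) * 4072 ≤ 4080 := by
          rw [← hmm]
          unfold chunkCount at hmc
          split_ifs at hmc <;> omega
        simp only [Nat.add_sub_cancel]
        omega
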